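-- pv_equiv track=rewrite | github.com/Roirtur/multi-expert-peptide-pipeline | streamlit_app/utils.py | format_colorized_logs
-- ===== SOURCE A (Python) =====
-- def format_colorized_logs(log_lines):
--     """Format log lines with color coding based on content keywords."""
--     import html
--     colored_logs = []
--
--     for line in log_lines:
--         # Determine color based on keywords
--         if "ERROR" in line or "Failed" in line or "Exception" in line:
--             color = "#ff4b4b"  # Red
--         elif "WARNING" in line or "warning" in line:
--             color = "#ffa500"  # Orange
--         elif "SUCCESS" in line or "successfully" in line.lower() or "saved" in line.lower():
--             color = "#09ab3b"  # Green
--         elif "INFO" in line or "Completed" in line or "Goal:" in line: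
--             color = "#91beec"  # Blue
--         elif "[Batch Start]" in line:
--             color = "#c678dd"  # Purple
--         elif "Found" in line or "Processed" in line or "Total" in line:
--             color = "#56b6f2"  # Light blue
--         else:
--             color = "#c9d1d9"  # Light gray
--
--         escaped = html.escape(line)
--         colored_logs.append(f'<div style="color: {color}; margin: 0.25rem 0;">{escaped}</div>')
--
--     styled_html = f'''
--     <div style="max-height: 500px; overflow-y: auto; background-color: #0e1117; border: 1px solid #30363d; border-radius: 0.5rem; padding: 1rem; font-family: 'Monaco', 'Menlo', 'Ubuntu Mono', monospace; font-size: 0.85em; line-height: 1.6;">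
--         {''.join(colored_logs)}
--     </div>
--     '''
--     return styled_html
-- ===== SOURCE B (Python) =====
-- # Keyword-major staged passes: B sweeps the whole list once per keyword, colouring
-- # still-uncoloured lines, instead of A's per-line if/elif cascade (objective: alternative).
-- _KEYWORDS = [
--     ("ERROR", False, "#ff4b4b"), ("Failed", False, "#ff4b4b"), ("Exception", False, "#ff4b4b"),
--     ("WARNING", False, "#ffa500"), ("warning", False, "#ffa500"),
--     ("SUCCESS", False, "#09ab3b"), ("successfully", True, "#09ab3b"), ("saved", True, "#09ab3b"),
--     ("INFO", False, "#91beec"), ("Completed", False, "#91beec"), ("Goal:", False, "#91beec"),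
--     ("[Batch Start]", False, "#c678dd"),
--     ("Found", False, "#56b6f2"), ("Processed", False, "#56b6f2"), ("Total", False, "#56b6f2"),
-- ]
--
-- def _escape(s):
--     # html.escape(s, quote=True), inlined
--     return (s.replace("&", "&amp;").replace("<", "&lt;").replace(">", "&gt;")
--              .replace('"', "&quot;").replace("'", "&#x27;"))
--
-- def format_colorized_logs(log_lines):
--     log_lines = list(log_lines)
--     colors = [None] * len(log_lines)
--     for kw, lowered, color in _KEYWORDS:       # one sweep over all lines per keyword
--         for i, line in enumerate(log_lines):
--             if colors[i] is None and kw in (line.lower() if lowered else line):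
--                 colors[i] = color
--     body = ''.join(
--         f'<div style="color: {c if c is not None else "#c9d1d9"}; margin: 0.25rem 0;">{_escape(line)}</div>'
--         for line, c in zip(log_lines, colors)
--     )
--     return f'''
--     <div style="max-height: 500px; overflow-y: auto; background-color: #0e1117; border: 1px solid #30363d; border-radius: 0.5rem; padding: 1rem; font-family: 'Monaco', 'Menlo', 'Ubuntu Mono', monospace; font-size: 0.85em; line-height: 1.6;">
--         {body}
--     </div>
--     '''
-- ===== Notes on version B (the rewrite author's own statement) =====
-- stated objective: alternative
-- what changed: Inverts the loop nesting: instead of A's per-line first-match if/elif cascade, B makes one staged sweep over the whole line list per priority keyword, colouring still-uncoloured lines in a colors array, then renders all divs from the finished array.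
import Mathlib
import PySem

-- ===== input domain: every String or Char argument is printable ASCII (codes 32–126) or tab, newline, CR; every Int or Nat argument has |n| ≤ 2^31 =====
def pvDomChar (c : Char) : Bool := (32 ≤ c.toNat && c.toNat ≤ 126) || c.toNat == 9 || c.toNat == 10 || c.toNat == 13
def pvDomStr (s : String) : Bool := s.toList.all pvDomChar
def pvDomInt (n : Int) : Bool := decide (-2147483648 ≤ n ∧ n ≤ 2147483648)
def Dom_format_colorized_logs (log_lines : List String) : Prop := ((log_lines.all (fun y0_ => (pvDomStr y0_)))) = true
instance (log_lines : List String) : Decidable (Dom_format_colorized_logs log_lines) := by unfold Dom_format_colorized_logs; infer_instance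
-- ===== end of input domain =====

-- B replaces A's per-line if/elif colour cascade by keyword-major staged passes (one sweep
-- over the whole line list per priority keyword, colouring still-uncoloured lines); objective: alternative.

-- html.escape(s) (quote=True), exactly CPython's replace chain; used by both pythons.
def pyHtmlEscape (s : String) : String :=
  PySem.Str.replace (PySem.Str.replace (PySem.Str.replace (PySem.Str.replace
    (PySem.Str.replace s "&" "&amp;") "<" "&lt;") ">" "&gt;") "\"" "&quot;") "'" "&#x27;"

-- the outer f-string template, identical in both pythons
def pvTemplatePre : String := "\n    <div style=\"max-height: 500px; overflow-y: auto; background-color: #0e1117; border: 1px solid #30363d; border-radius: 0.5rem; padding: 1rem; font-family: 'Monaco', 'Menlo', 'Ubuntu Mono', monospace; font-size: 0.85em; line-height: 1.6;\">\n        "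
def pvTemplateSuf : String := "\n    </div>\n    "

-- ===== PORT A =====
-- the body of A's for-loop: pick the colour by the if/elif chain, escape, format the div
def pvLineDivA (line : String) : String :=
  let color :=
    if PySem.Str.isIn "ERROR" line || PySem.Str.isIn "Failed" line || PySem.Str.isIn "Exception" line then "#ff4b4b"
    else if PySem.Str.isIn "WARNING" line || PySem.Str.isIn "warning" line then "#ffa500"
    else if PySem.Str.isIn "SUCCESS" line || PySem.Str.isIn "successfully" (PySem.Str.lower line) || PySem.Str.isIn "saved" (PySem.Str.lower line) then "#09ab3b"
    else if PySem.Str.isIn "INFO" line || PySem.Str.isIn "Completed" line || PySem.Str.isIn "Goal:" line then "#91beec"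
    else if PySem.Str.isIn "[Batch Start]" line then "#c678dd"
    else if PySem.Str.isIn "Found" line || PySem.Str.isIn "Processed" line || PySem.Str.isIn "Total" line then "#56b6f2"
    else "#c9d1d9"
  let escaped := pyHtmlEscape line
  PySem.Str.join "" ["<div style=\"color: ", color, "; margin: 0.25rem 0;\">", escaped, "</div>"]

def format_colorized_logs (log_lines : List String) : String :=
  let colored_logs := log_lines.foldl (fun acc line => acc ++ [pvLineDivA line]) []
  PySem.Str.join "" [pvTemplatePre, PySem.Str.join "" colored_logs, pvTemplateSuf]

-- ===== PORT B =====
-- B's flat priority list of (keyword, search-in-lowered-line?, colour) entries (Source B's _KEYWORDS)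
def pvKeywords : List (String × Bool × String) :=
  [ ("ERROR", false, "#ff4b4b"), ("Failed", false, "#ff4b4b"), ("Exception", false, "#ff4b4b"),
    ("WARNING", false, "#ffa500"), ("warning", false, "#ffa500"),
    ("SUCCESS", false, "#09ab3b"), ("successfully", true, "#09ab3b"), ("saved", true, "#09ab3b"),
    ("INFO", false, "#91beec"), ("Completed", false, "#91beec"), ("Goal:", false, "#91beec"),
    ("[Batch Start]", false, "#c678dd"),
    ("Found", false, "#56b6f2"), ("Processed", false, "#56b6f2"), ("Total", false, "#56b6f2") ]

-- the inner-loop body of one sweep: colour this line if still uncoloured and the keyword matches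
def pvStep (kw : String) (low : Bool) (c : String) (line : String) (o : Option String) : Option String :=
  if o.isNone && PySem.Str.isIn kw (if low then PySem.Str.lower line else line) then some c else o

def format_colorized_logs_alt (log_lines : List String) : String :=
  let colors := pvKeywords.foldl
    (fun cols kwc => (log_lines.zip cols).map (fun p => pvStep kwc.1 kwc.2.1 kwc.2.2 p.1 p.2))
    (log_lines.map (fun _ => (none : Option String)))
  let body := PySem.Str.join "" ((log_lines.zip colors).map (fun p =>
    PySem.Str.join "" ["<div style=\"color: ", p.2.getD "#c9d1d9", "; margin: 0.25rem 0;\">", pyHtmlEscape p.1, "</div>"]))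
  PySem.Str.join "" [pvTemplatePre, body, pvTemplateSuf]

-- ===== PRECONDITION & SPEC =====
def Spec_format_colorized_logs (log_lines : List String) (out : String) : Prop := out = format_colorized_logs_alt log_lines
instance (log_lines : List String) (out : String) : Decidable (Spec_format_colorized_logs log_lines out) := by unfold Spec_format_colorized_logs; infer_instance

-- ===== CLAIM (what is proved, stated in full; the proofs are below) =====
def Claim_equal_format_colorized_logs : Prop := ∀ (log_lines : List String), Dom_format_colorized_logs log_lines → Spec_format_colorized_logs log_lines (format_colorized_logs log_lines)

-- ===== LEMMAS AND PROOFS =====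

-- A's keyword groups, and their flattening (which equals pvKeywords definitionally)
def pvGroups : List (List (String × Bool) × String) :=
  [ ([("ERROR", false), ("Failed", false), ("Exception", false)], "#ff4b4b"),
    ([("WARNING", false), ("warning", false)], "#ffa500"),
    ([("SUCCESS", false), ("successfully", true), ("saved", true)], "#09ab3b"),
    ([("INFO", false), ("Completed", false), ("Goal:", false)], "#91beec"),
    ([("[Batch Start]", false)], "#c678dd"),
    ([("Found", false), ("Processed", false), ("Total", false)], "#56b6f2") ]

def pvFlat (gs : List (List (String × Bool) × String)) : List (String × Bool × String) :=
  gs.flatMap (fun g => g.1.map (fun kw => (kw.1, kw.2, g.2)))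

-- colour of the first group any of whose keywords matches; default light gray
def pvFirstColor (line low : String) : List (List (String × Bool) × String) → String
  | [] => "#c9d1d9"
  | (kws, c) :: rest =>
      if kws.any (fun kw => PySem.Str.isIn kw.1 (if kw.2 then low else line)) then c
      else pvFirstColor line low rest

-- a map-zip-map fusion: one sweep acts pointwise on the colour list
lemma zip_map_self {α β γ : Type} (xs : List α) (g : α → β) (h : α × β → γ) :
    (xs.zip (xs.map g)).map h = xs.map (fun x => h (x, g x)) := by
  induction xs with
  | nil => rfl
  | cons a t ih => simp [ih]

-- the whole keyword-major fold equals a map of the per-line keyword fold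
lemma fold_pointwise (ks : List (String × Bool × String)) (xs : List String) (g : String → Option String) :
    ks.foldl (fun cols kwc => (xs.zip cols).map (fun p => pvStep kwc.1 kwc.2.1 kwc.2.2 p.1 p.2)) (xs.map g)
      = xs.map (fun line => ks.foldl (fun o kwc => pvStep kwc.1 kwc.2.1 kwc.2.2 line o) (g line)) := by
  induction ks generalizing g with
  | nil => rfl
  | cons k t ih =>
      simp only [List.foldl_cons]
      rw [zip_map_self xs g (fun p => pvStep k.1 k.2.1 k.2.2 p.1 p.2), ih]

-- once a line is coloured, later sweeps leave it unchanged
lemma fold_some (ks : List (String × Bool × String)) (line c : String) :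
    ks.foldl (fun o kwc => pvStep kwc.1 kwc.2.1 kwc.2.2 line o) (some c) = some c := by
  induction ks with
  | nil => rfl
  | cons k t ih => simpa [pvStep] using ih

-- sweeping one group's keywords from an uncoloured state = "any keyword matches"
lemma group_fold (line c : String) (kws : List (String × Bool)) :
    (kws.map (fun kw => (kw.1, kw.2, c))).foldl (fun o kwc => pvStep kwc.1 kwc.2.1 kwc.2.2 line o) none
      = if kws.any (fun kw => PySem.Str.isIn kw.1 (if kw.2 then PySem.Str.lower line else line)) then some c
        else none := by
  induction kws with
  | nil => rfl
  | cons k t ih =>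
      rw [List.map_cons, List.foldl_cons, List.any_cons]
      by_cases h : PySem.Str.isIn k.1 (if k.2 then PySem.Str.lower line else line) = true
      · have h' : PySem.Chars.isIn k.1.toList (if k.2 then PySem.Str.lower line else line).toList = true := by
          simpa using h
        rw [show pvStep k.1 k.2 c line none = some c by simp [pvStep, h'], fold_some, h,
            Bool.true_or, if_pos rfl]
      · rw [Bool.not_eq_true] at h
        have h' : PySem.Chars.isIn k.1.toList (if k.2 then PySem.Str.lower line else line).toList = false := by
          simpa using h
        rw [show pvStep k.1 k.2 c line none = none by simp [pvStep, h'], ih, h, Bool.false_or]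

-- the per-line fold over a flattened group list is first-match group colouring
lemma flat_fold (line : String) (gs : List (List (String × Bool) × String)) :
    ((pvFlat gs).foldl (fun o kwc => pvStep kwc.1 kwc.2.1 kwc.2.2 line o) none).getD "#c9d1d9"
      = pvFirstColor line (PySem.Str.lower line) gs := by
  induction gs with
  | nil => rfl
  | cons g t ih =>
      rw [show pvFlat (g :: t) = (g.1.map (fun kw => (kw.1, kw.2, g.2))) ++ pvFlat t from rfl,
          List.foldl_append, group_fold]
      by_cases h : g.1.any (fun kw => PySem.Str.isIn kw.1 (if kw.2 then PySem.Str.lower line else line)) = true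
      · rw [if_pos (by simpa using h), fold_some, Option.getD_some]
        cases g with
        | mk kws c => simp only [pvFirstColor]; rw [if_pos (by simpa using h)]
      · rw [if_neg (by simpa using h), ih]
        cases g with
        | mk kws c => simp only [pvFirstColor]; rw [if_neg (by simpa using h)]

-- the per-line keyword fold reproduces A's if/elif cascade div
lemma perLine_eq (line : String) :
    pvLineDivA line = PySem.Str.join "" ["<div style=\"color: ",
      (pvKeywords.foldl (fun o kwc => pvStep kwc.1 kwc.2.1 kwc.2.2 line o) none).getD "#c9d1d9",
      "; margin: 0.25rem 0;\">", pyHtmlEscape line, "</div>"] := by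
  rw [show pvKeywords = pvFlat pvGroups from rfl, flat_fold]
  simp [pvLineDivA, pvGroups, pvFirstColor, Bool.or_assoc]

lemma pvFold_eq (ls : List String) (acc : List String) :
    ls.foldl (fun acc line => acc ++ [pvLineDivA line]) acc = acc ++ ls.map pvLineDivA := by
  induction ls generalizing acc with
  | nil => simp
  | cons l t ih => rw [List.foldl_cons, ih]; simp

-- ===== VERDICT (by name: the statement is the Claim_ definition above) =====
theorem format_colorized_logs_spec : Claim_equal_format_colorized_logs := by
  intro ls _
  show format_colorized_logs ls = format_colorized_logs_alt ls
  simp only [format_colorized_logs, format_colorized_logs_alt]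
  rw [pvFold_eq, fold_pointwise, zip_map_self]
  simp only [List.nil_append]
  rw [List.map_congr_left (fun line _ => perLine_eq line)]
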